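-- pv_equiv track=rewrite | github.com/colaisr/infrazen | app/providers/selectel/service.py | _infer_resource_type_from_metrics
-- ===== SOURCE A (Python) =====
-- from typing import Dict, List, Any, Optional
--
-- def _infer_resource_type_from_metrics(billing_data: Dict) -> Optional[str]:
--     """
--     Infer resource type from billing metrics when type is unknown.
--     This helps identify resource types that Selectel billing API doesn't properly categorize.
--     """
--     metrics = billing_data.get('metrics', {})
--
--     # Load Balancer detection
--     if any(key.startswith('load_balancers_') for key in metrics.keys()):
--         return 'network_load_balancer'
--
--     # Volume detection
--     if any(key.startswith('volume_') for key in metrics.keys()):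
--         return 'volume_universal'  # Default to universal volume
--
--     # File Storage detection
--     if any(key.startswith('share_') for key in metrics.keys()):
--         return 'share_basic'  # Default to basic share
--
--     # Database detection
--     if any(key.startswith('dbaas_') for key in metrics.keys()):
--         return 'dbaas_postgresql'  # Default to PostgreSQL
--
--     # Kubernetes detection
--     if any(key.startswith('mks_') for key in metrics.keys()):
--         return 'mks_cluster'
--
--     # Container Registry detection
--     if any(key.startswith('craas_') for key in metrics.keys()):
--         return 'craas_registry'
--
--     # S3 detection
--     if any(key.startswith('s3_') for key in metrics.keys()):
--         return 's3_storage'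
--
--     # Network detection
--     if any(key.startswith('network_') for key in metrics.keys()):
--         return 'network_floating_ip'  # Default to floating IP
--
--     # Backup detection
--     if any(key.startswith('backup_') for key in metrics.keys()):
--         return 'backup_storage'
--
--     # If no metrics match, return None (will stay as other_service)
--     return None
-- ===== SOURCE B (Python) =====
-- _PREFIX_TABLE = [
--     ("load_balancers_", "network_load_balancer"),
--     ("volume_", "volume_universal"),
--     ("share_", "share_basic"),
--     ("dbaas_", "dbaas_postgresql"),
--     ("mks_", "mks_cluster"),
--     ("craas_", "craas_registry"),
--     ("s3_", "s3_storage"),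
--     ("network_", "network_floating_ip"),
--     ("backup_", "backup_storage"),
-- ]
--
--
-- def _infer_resource_type_from_metrics(billing_data):
--     metrics = billing_data.get('metrics', {})
--     best = None
--     for key in metrics.keys():
--         for i, (prefix, _result) in enumerate(_PREFIX_TABLE):
--             if key.startswith(prefix):
--                 if best is None or i < best:
--                     best = i
--                 break
--     if best is None:
--         return None
--     return _PREFIX_TABLE[best][1]
-- ===== Notes on version B (the rewrite author's own statement) =====
-- stated objective: alternative
-- what changed: Replaces nine separate any() scans over the metric keys by a single pass over the keys that tracks the minimum matching index in an ordered (prefix, result) priority table.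
import Mathlib
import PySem

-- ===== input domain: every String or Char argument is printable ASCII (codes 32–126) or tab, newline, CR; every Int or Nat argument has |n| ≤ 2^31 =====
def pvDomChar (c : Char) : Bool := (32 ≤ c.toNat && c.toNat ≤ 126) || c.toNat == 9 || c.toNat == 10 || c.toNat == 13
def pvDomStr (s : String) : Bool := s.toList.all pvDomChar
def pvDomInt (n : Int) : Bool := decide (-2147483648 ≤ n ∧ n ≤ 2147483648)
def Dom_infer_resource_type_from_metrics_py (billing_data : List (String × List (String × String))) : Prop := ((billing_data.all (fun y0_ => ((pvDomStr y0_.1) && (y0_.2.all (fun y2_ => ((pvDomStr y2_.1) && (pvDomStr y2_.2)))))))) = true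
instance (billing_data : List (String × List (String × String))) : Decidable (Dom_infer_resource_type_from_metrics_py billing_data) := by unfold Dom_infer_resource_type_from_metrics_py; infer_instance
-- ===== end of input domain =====

-- B replaces A's nine separate any() prefix scans by one pass over the keys tracking the
-- minimum matching index in an ordered (prefix, result) priority table (alternative decomposition).


-- ===== PORT A =====
-- any(key.startswith(prefix) for key in keys)
def pvAnyPrefix (keys : List String) (p : String) : Bool :=
  keys.any (fun k => PySem.Str.startswith k p)

def infer_resource_type_from_metrics_py (billing_data : List (String × List (String × String))) : Option String :=
  -- metrics = billing_data.get('metrics', {})  (dict → assoc list, first match)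
  let metrics := ((billing_data.find? (fun p => p.1 == "metrics")).map Prod.snd).getD []
  let keys := metrics.map Prod.fst
  if pvAnyPrefix keys "load_balancers_" then some "network_load_balancer"
  else if pvAnyPrefix keys "volume_" then some "volume_universal"
  else if pvAnyPrefix keys "share_" then some "share_basic"
  else if pvAnyPrefix keys "dbaas_" then some "dbaas_postgresql"
  else if pvAnyPrefix keys "mks_" then some "mks_cluster"
  else if pvAnyPrefix keys "craas_" then some "craas_registry"
  else if pvAnyPrefix keys "s3_" then some "s3_storage"
  else if pvAnyPrefix keys "network_" then some "network_floating_ip"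
  else if pvAnyPrefix keys "backup_" then some "backup_storage"
  else none

-- ===== PORT B =====
def pvTable : List (String × String) :=
  [("load_balancers_", "network_load_balancer"),
   ("volume_", "volume_universal"),
   ("share_", "share_basic"),
   ("dbaas_", "dbaas_postgresql"),
   ("mks_", "mks_cluster"),
   ("craas_", "craas_registry"),
   ("s3_", "s3_storage"),
   ("network_", "network_floating_ip"),
   ("backup_", "backup_storage")]

-- inner loop: 'for i, (prefix, _) in enumerate(table): if key.startswith(prefix): … break'
-- = index of the first table entry whose prefix matches
def pvFirstIdx {α : Type} (P : α → Bool) : List α → Option Nat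
  | [] => none
  | a :: t => if P a then some 0 else (pvFirstIdx P t).map (· + 1)

-- per-key body of the outer loop: keep the smallest matching index seen so far
def pvStep (best : Option Nat) (key : String) : Option Nat :=
  match pvFirstIdx (fun pr => PySem.Str.startswith key pr.1) pvTable with
  | none => best
  | some i =>
    match best with
    | none => some i
    | some b => if i < b then some i else some b

def infer_resource_type_from_metrics_py_alt (billing_data : List (String × List (String × String))) : Option String :=
  let metrics := ((billing_data.find? (fun p => p.1 == "metrics")).map Prod.snd).getD []
  let keys := metrics.map Prod.fst
  match keys.foldl pvStep none with
  | none => none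
  | some b =>
    match pvTable[b]? with
    | some pr => some pr.2
    | none => none

-- ===== PRECONDITION & SPEC =====
def Spec_infer_resource_type_from_metrics_py (billing_data : List (String × List (String × String))) (out : Option String) : Prop := out = infer_resource_type_from_metrics_py_alt billing_data
instance (billing_data : List (String × List (String × String))) (out : Option String) : Decidable (Spec_infer_resource_type_from_metrics_py billing_data out) := by unfold Spec_infer_resource_type_from_metrics_py; infer_instance

-- ===== CLAIM (what is proved, stated in full; the proofs are below) =====
def Claim_equal_infer_resource_type_from_metrics_py : Prop := ∀ (billing_data : List (String × List (String × String))), Dom_infer_resource_type_from_metrics_py billing_data → Spec_infer_resource_type_from_metrics_py billing_data (infer_resource_type_from_metrics_py billing_data)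

-- ===== LEMMAS AND PROOFS =====

-- min on Option Nat (none = "no match yet")
def pvMin (a b : Option Nat) : Option Nat :=
  match a, b with
  | none, b => b
  | a, none => a
  | some x, some y => some (min x y)

lemma pvStep_eq_pvMin (best : Option Nat) (key : String) :
    pvStep best key = pvMin best (pvFirstIdx (fun pr => PySem.Str.startswith key pr.1) pvTable) := by
  unfold pvStep pvMin
  cases pvFirstIdx (fun pr => PySem.Str.startswith key pr.1) pvTable with
  | none => cases best <;> rfl
  | some i =>
    cases best with
    | none => rfl
    | some b =>
      by_cases h : i < b
      · simp [h, Nat.min_eq_right (Nat.le_of_lt h)]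
      · simp [h, Nat.min_eq_left (by omega : b ≤ i)]

lemma pvMin_none_right (a : Option Nat) : pvMin a none = a := by cases a <;> rfl

lemma pvMin_none_left (a : Option Nat) : pvMin none a = a := rfl

lemma pvMin_assoc (a b c : Option Nat) : pvMin (pvMin a b) c = pvMin a (pvMin b c) := by
  cases a <;> cases b <;> cases c <;> simp [pvMin, Nat.min_assoc]

lemma foldl_pvStep (keys : List String) (b : Option Nat) :
    keys.foldl pvStep b = pvMin b (keys.foldl pvStep none) := by
  induction keys generalizing b with
  | nil => simp [List.foldl, pvMin_none_right]
  | cons k ks ih =>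
    simp only [List.foldl]
    rw [ih, ih (pvStep none k), pvStep_eq_pvMin, pvStep_eq_pvMin, pvMin_none_left, pvMin_assoc]

-- the first index matched by P or by Q is the min of the two first indices
lemma pvMin_firstIdx_or {α : Type} (P Q : α → Bool) (t : List α) :
    pvMin (pvFirstIdx P t) (pvFirstIdx Q t) = pvFirstIdx (fun a => P a || Q a) t := by
  induction t with
  | nil => rfl
  | cons a t ih =>
    simp only [pvFirstIdx]
    by_cases hP : P a <;> by_cases hQ : Q a
    · simp [hP, hQ, pvMin]
    · simp only [hP, hQ, Bool.true_or, if_true]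
      cases pvFirstIdx Q t <;> simp [pvMin]
    · simp only [hP, hQ, Bool.false_or, if_true]
      cases pvFirstIdx P t <;> simp [pvMin]
    · simp only [hP, hQ, Bool.false_or]
      rw [← ih]
      cases pvFirstIdx P t <;> cases pvFirstIdx Q t <;> simp [pvMin]

-- the single pass with min-tracking computes the first table index matched by SOME key
lemma foldl_pvStep_eq_firstIdx_any (keys : List String) :
    keys.foldl pvStep none
      = pvFirstIdx (fun pr => keys.any (fun k => PySem.Str.startswith k pr.1)) pvTable := by
  induction keys with
  | nil => rfl
  | cons k ks ih =>
    simp only [List.foldl]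
    rw [foldl_pvStep, pvStep_eq_pvMin, pvMin, ih, pvMin_firstIdx_or]
    simp only [List.any_cons]

-- A's nested-if chain over the nine any() scans equals B's min-index result, for any key list
lemma pvMain (keys : List String) :
    (if pvAnyPrefix keys "load_balancers_" then some "network_load_balancer"
     else if pvAnyPrefix keys "volume_" then some "volume_universal"
     else if pvAnyPrefix keys "share_" then some "share_basic"
     else if pvAnyPrefix keys "dbaas_" then some "dbaas_postgresql"
     else if pvAnyPrefix keys "mks_" then some "mks_cluster"
     else if pvAnyPrefix keys "craas_" then some "craas_registry"
     else if pvAnyPrefix keys "s3_" then some "s3_storage"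
     else if pvAnyPrefix keys "network_" then some "network_floating_ip"
     else if pvAnyPrefix keys "backup_" then some "backup_storage"
     else none)
      = (match keys.foldl pvStep none with
         | none => none
         | some b =>
           match pvTable[b]? with
           | some pr => some pr.2
           | none => (none : Option String)) := by
  rw [foldl_pvStep_eq_firstIdx_any]
  simp only [pvFirstIdx, pvTable, pvAnyPrefix]
  by_cases h0 : keys.any (fun k => PySem.Str.startswith k "load_balancers_") = true
  · simp only [if_pos h0]
    rfl
  simp only [if_neg h0]
  by_cases h1 : keys.any (fun k => PySem.Str.startswith k "volume_") = true
  · simp only [if_pos h1]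
    rfl
  simp only [if_neg h1]
  by_cases h2 : keys.any (fun k => PySem.Str.startswith k "share_") = true
  · simp only [if_pos h2]
    rfl
  simp only [if_neg h2]
  by_cases h3 : keys.any (fun k => PySem.Str.startswith k "dbaas_") = true
  · simp only [if_pos h3]
    rfl
  simp only [if_neg h3]
  by_cases h4 : keys.any (fun k => PySem.Str.startswith k "mks_") = true
  · simp only [if_pos h4]
    rfl
  simp only [if_neg h4]
  by_cases h5 : keys.any (fun k => PySem.Str.startswith k "craas_") = true
  · simp only [if_pos h5]
    rfl
  simp only [if_neg h5]
  by_cases h6 : keys.any (fun k => PySem.Str.startswith k "s3_") = true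
  · simp only [if_pos h6]
    rfl
  simp only [if_neg h6]
  by_cases h7 : keys.any (fun k => PySem.Str.startswith k "network_") = true
  · simp only [if_pos h7]
    rfl
  simp only [if_neg h7]
  by_cases h8 : keys.any (fun k => PySem.Str.startswith k "backup_") = true
  · simp only [if_pos h8]
    rfl
  simp only [if_neg h8]
  rfl

-- ===== VERDICT (by name: the statement is the Claim_ definition above) =====
theorem infer_resource_type_from_metrics_py_spec : Claim_equal_infer_resource_type_from_metrics_py := by
  intro billing_data _hdom
  show infer_resource_type_from_metrics_py billing_data = infer_resource_type_from_metrics_py_alt billing_data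
  exact pvMain ((((billing_data.find? (fun p => p.1 == "metrics")).map Prod.snd).getD []).map Prod.fst)
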